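-- pv_equiv track=rewrite | github.com/ViniciusGN/Cryptography-Cybersec | main.py | lists_definition
-- ===== SOURCE A (Python) =====
-- def lists_definition(text):
--     text_list = []
--     text_matriz = []
--     for i in range(0, len(text), 2):
--         text_list.append(text[i:i+2])
--     for i in range(0, len(text_list), 4):
--         text_matriz.append(text_list[i:i+4])
--     return text_matriz
-- ===== SOURCE B (Python) =====
-- def lists_definition(text):
--     # One pass over stride-8 windows: each row's 2-char pairs are built inside
--     # its own block; the flat intermediate list of all pairs never exists.
--     result = []
--     for i in range(0, len(text), 8):
--         block = text[i:i+8]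
--         pairs = []
--         for j in range(0, len(block), 2):
--             pairs.append(block[j:j+2])
--         result.append(pairs)
--     return result
-- ===== Notes on version B (the rewrite author's own statement) =====
-- stated objective: alternative
-- what changed: B makes a single pass over stride-8 windows of the text, building each row's 2-char pairs inside its own block, instead of A's two sequential passes that first materialise a flat list of all pairs and then re-chunk it by fours.
import Mathlib
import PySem

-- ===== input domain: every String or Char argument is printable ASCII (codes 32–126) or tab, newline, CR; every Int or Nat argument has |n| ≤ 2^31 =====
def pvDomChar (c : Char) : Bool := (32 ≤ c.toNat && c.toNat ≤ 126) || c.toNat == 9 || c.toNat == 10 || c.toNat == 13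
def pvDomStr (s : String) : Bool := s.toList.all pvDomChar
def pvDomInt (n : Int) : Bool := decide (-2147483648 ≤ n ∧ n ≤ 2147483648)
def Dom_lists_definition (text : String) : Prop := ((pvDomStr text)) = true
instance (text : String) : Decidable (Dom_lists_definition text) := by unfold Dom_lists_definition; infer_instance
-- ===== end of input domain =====

-- B replaces A's two sequential passes (a flat list of all 2-char pairs, then re-chunking it by
-- fours) with a single pass over stride-8 blocks that builds each row's pairs inside its block.

-- ===== PORT A =====
-- literal transliteration: first loop appends text[i:i+2] for i in range(0, len(text), 2),
-- second loop appends text_list[i:i+4] for i in range(0, len(text_list), 4)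
def lists_definition (text : String) : List (List String) :=
  let text_list : List String :=
    (PySem.List.pyRange 0 (PySem.Str.len text) 2).foldl
      (fun acc i => acc ++ [PySem.Str.slice text (some i) (some (i + 2))]) []
  (PySem.List.pyRange 0 (text_list.length : Int) 4).foldl
    (fun acc i => acc ++ [PySem.List.slice text_list (some i) (some (i + 4))]) []

-- ===== PORT B =====
-- inner loop: pairs.append(block[j:j+2]) for j in range(0, len(block), 2)
def pvPairsOf (block : String) : List String :=
  (PySem.List.pyRange 0 (PySem.Str.len block) 2).foldl
    (fun acc j => acc ++ [PySem.Str.slice block (some j) (some (j + 2))]) []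

-- outer loop: result.append(pairs of text[i:i+8]) for i in range(0, len(text), 8)
def lists_definition_alt (text : String) : List (List String) :=
  (PySem.List.pyRange 0 (PySem.Str.len text) 8).foldl
    (fun acc i => acc ++ [pvPairsOf (PySem.Str.slice text (some i) (some (i + 8)))]) []

-- ===== PRECONDITION & SPEC =====
def Spec_lists_definition (text : String) (out : List (List String)) : Prop := out = lists_definition_alt text
instance (text : String) (out : List (List String)) : Decidable (Spec_lists_definition text out) := by unfold Spec_lists_definition; infer_instance

-- ===== CLAIM (what is proved, stated in full; the proofs are below) =====
def Claim_equal_lists_definition : Prop := ∀ (text : String), Dom_lists_definition text → Spec_lists_definition text (lists_definition text)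

-- ===== LEMMAS AND PROOFS =====

def chunkBy {α β : Type} (f : List α → β) (k : ℕ) : List α → List β
  | [] => []
  | a :: t => f ((a :: t).take (k + 1)) :: chunkBy f k ((a :: t).drop (k + 1))
  termination_by l => l.length
  decreasing_by simp

theorem chunkBy_nil {α β : Type} (f : List α → β) (k : ℕ) : chunkBy f k [] = [] := by
  simp [chunkBy]

theorem chunkBy_cons {α β : Type} (f : List α → β) (k : ℕ) (a : α) (t : List α) :
    chunkBy f k (a :: t) = f ((a :: t).take (k + 1)) :: chunkBy f k ((a :: t).drop (k + 1)) := by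
  rw [chunkBy]

theorem chunkBy_of_ne_nil {α β : Type} (f : List α → β) (k : ℕ) (l : List α) (h : l ≠ []) :
    chunkBy f k l = f (l.take (k + 1)) :: chunkBy f k (l.drop (k + 1)) := by
  cases l with
  | nil => exact absurd rfl h
  | cons a t => exact chunkBy_cons f k a t

theorem pyRange_zero_of_nonpos (b s : Int) (hs : 0 < s) (hb : b ≤ 0) :
    PySem.List.pyRange 0 b s = [] := by
  rw [PySem.List.pyRange_of_pos 0 b hs, if_neg (by omega)]
  simp

theorem pyRange_shift (b s : Int) (hs : 0 < s) :
    PySem.List.pyRange s b s = (PySem.List.pyRange 0 (b - s) s).map (· + s) := by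
  rw [PySem.List.pyRange_of_pos s b hs, PySem.List.pyRange_of_pos 0 (b - s) hs, List.map_map]
  have e1 : b - s - 0 + s - 1 = b - s + s - 1 := by ring
  rw [e1]
  have e2 : (if s < b then ((b - s + s - 1) / s).toNat else 0)
      = (if 0 < b - s then ((b - s + s - 1) / s).toNat else 0) := by
    split_ifs with h1 h2 <;> first | rfl | omega
  rw [e2]
  apply List.map_congr_left
  intro x _
  simp [Function.comp]
  ring

theorem pyRange_pos_cons (b s : Int) (hs : 0 < s) (hb : 0 < b) :
    PySem.List.pyRange 0 b s = 0 :: PySem.List.pyRange s b s := by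
  rw [pyRange_shift b s hs, PySem.List.pyRange_of_pos 0 b hs, PySem.List.pyRange_of_pos 0 (b - s) hs,
    if_pos (by omega)]
  have e1 : b - 0 + s - 1 = (b - s - 0 + s - 1) + 1 * s := by ring
  rw [e1, Int.add_mul_ediv_right _ _ (by omega)]
  have hnn : 0 ≤ (b - s - 0 + s - 1) / s := Int.ediv_nonneg (by omega) (by omega)
  by_cases h : 0 < b - s
  · rw [if_pos h]
    have : ((b - s - 0 + s - 1) / s + 1).toNat = ((b - s - 0 + s - 1) / s).toNat + 1 := by omega
    rw [this, List.range_succ_eq_map, List.map_cons, List.map_map, List.map_map]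
    congr 1
    · simp
    · apply List.map_congr_left
      intro x _
      simp [Function.comp]
      ring
  · rw [if_neg h]
    have hd : (b - s - 0 + s - 1) / s = 0 := Int.ediv_eq_zero_of_lt (by omega) (by omega)
    rw [hd]
    simp

theorem foldl_pyRange_slice {α β : Type} (f : List α → β) (k : ℕ) (l : List α) :
    ∀ (acc : List β),
      (PySem.List.pyRange 0 (l.length : Int) ((k : Int) + 1)).foldl
        (fun acc i => acc ++ [f (PySem.List.slice l (some i) (some (i + ((k : Int) + 1))))]) acc
      = acc ++ chunkBy f k l := by
  induction l using chunkBy.induct (k := k) with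
  | case1 =>
    intro acc
    simp only [List.length_nil, Int.natCast_zero]
    rw [pyRange_zero_of_nonpos _ _ (by omega) (by omega), chunkBy_nil]
    simp
  | case2 a t IH =>
    intro acc
    have hs : (0 : Int) < (k : Int) + 1 := by omega
    rw [pyRange_pos_cons _ _ hs (by simp), List.foldl_cons]
    have hsl0 : PySem.List.slice (a :: t) (some 0) (some (0 + ((k : Int) + 1)))
        = (a :: t).take (k + 1) := by
      rw [zero_add, PySem.List.slice_toNat _ (by omega) (by omega)]
      simp
    rw [hsl0, pyRange_shift _ _ hs, List.foldl_map]
    have hrange : PySem.List.pyRange 0 (((a :: t).length : Int) - ((k : Int) + 1)) ((k : Int) + 1)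
        = PySem.List.pyRange 0 ((((a :: t).drop (k + 1)).length : Int)) ((k : Int) + 1) := by
      by_cases hc : (k : Int) + 1 ≤ ((a :: t).length : Int)
      · congr 1
        simp only [List.length_drop, List.length_cons] at hc ⊢
        omega
      · rw [pyRange_zero_of_nonpos _ _ hs (by omega), pyRange_zero_of_nonpos _ _ hs]
        simp only [List.length_drop, List.length_cons] at hc ⊢
        omega
    rw [hrange, PySem.List.foldl_congr_mem _ _
      (fun acc2 i => acc2 ++ [f (PySem.List.slice ((a :: t).drop (k + 1)) (some i) (some (i + ((k : Int) + 1))))]) _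
      (by
        intro acc2 x hx
        have hx0 : 0 ≤ x := by
          rcases (PySem.List.mem_pyRange_iff_of_pos hs x).mp hx with ⟨h1, _, _⟩
          omega
        have hA : PySem.List.slice (a :: t) (some (x + ((k : Int) + 1)))
            (some (x + ((k : Int) + 1) + ((k : Int) + 1)))
            = List.take (k + 1) (List.drop (x.toNat + (k + 1)) (a :: t)) := by
          rw [PySem.List.slice_toNat _ (by omega) (by omega)]
          congr 1
          · omega
          · congr 1
            omega
        have hB : PySem.List.slice ((a :: t).drop (k + 1)) (some x) (some (x + ((k : Int) + 1)))
            = List.take (k + 1) (List.drop (x.toNat + (k + 1)) (a :: t)) := by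
          rw [PySem.List.slice_toNat _ (by omega) (by omega), List.drop_drop]
          congr 1
          · omega
          · congr 1
            omega
        simp only [hA, hB])]
    rw [IH, chunkBy_cons]
    simp

theorem chunkBy_append {α β : Type} (f : List α → β) (k : ℕ) (a : List α) :
    ∀ (b : List α), (k + 1) ∣ a.length →
      chunkBy f k (a ++ b) = chunkBy f k a ++ chunkBy f k b := by
  induction a using chunkBy.induct (k := k) with
  | case1 => intro b _; simp [chunkBy_nil]
  | case2 x t IH =>
    intro b hdvd
    have hlen : k + 1 ≤ (x :: t).length := Nat.le_of_dvd (by simp) hdvd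
    rw [chunkBy_of_ne_nil f k ((x :: t) ++ b) (by simp), chunkBy_cons,
      List.take_append_of_le_length hlen,
      List.drop_append_of_le_length hlen,
      IH b (by simp only [List.length_drop]; exact Nat.dvd_sub hdvd dvd_rfl)]
    simp

theorem chunkBy_short {α β : Type} (f : List α → β) (k : ℕ) (l : List α)
    (h0 : l ≠ []) (hle : l.length ≤ k + 1) : chunkBy f k l = [f l] := by
  cases l with
  | nil => exact absurd rfl h0
  | cons a t =>
    rw [chunkBy_cons, List.take_of_length_le hle, List.drop_eq_nil_of_le hle, chunkBy_nil]

theorem chunkBy_length_of_eq {α β : Type} (f : List α → β) (k : ℕ) :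
    ∀ (m : ℕ) (l : List α), l.length = (k + 1) * m → (chunkBy f k l).length = m := by
  intro m
  induction m with
  | zero =>
    intro l hl
    simp at hl
    simp [hl, chunkBy_nil]
  | succ m IH =>
    intro l hl
    cases l with
    | nil => simp at hl
    | cons a t =>
      have hl' : (a :: t).length = (k + 1) * m + (k + 1) := by rw [hl]; ring
      rw [chunkBy_cons, List.length_cons, IH _ (by simp at hl' ⊢; omega)]

theorem chunk_renest {α : Type} (f : List α → String) (l : List α) :
    chunkBy id 3 (chunkBy f 1 l) = chunkBy (chunkBy f 1) 7 l := by
  induction l using chunkBy.induct (k := 7) with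
  | case1 => simp [chunkBy_nil]
  | case2 a t IH =>
    by_cases h8 : (a :: t).length ≤ 8
    · have hp : chunkBy f 1 (a :: t) ≠ [] := by rw [chunkBy_cons]; simp
      have hplen : ∀ (s : List α), s.length ≤ 8 → (chunkBy f 1 s).length ≤ 4 := by
        intro s hs
        match s with
        | [] => simp [chunkBy_nil]
        | [c1] => simp [chunkBy_cons, chunkBy_nil]
        | [c1, c2] => simp [chunkBy_cons, chunkBy_nil]
        | [c1, c2, c3] => simp [chunkBy_cons, chunkBy_nil]
        | [c1, c2, c3, c4] => simp [chunkBy_cons, chunkBy_nil]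
        | [c1, c2, c3, c4, c5] => simp [chunkBy_cons, chunkBy_nil]
        | [c1, c2, c3, c4, c5, c6] => simp [chunkBy_cons, chunkBy_nil]
        | [c1, c2, c3, c4, c5, c6, c7] => simp [chunkBy_cons, chunkBy_nil]
        | [c1, c2, c3, c4, c5, c6, c7, c8] => simp [chunkBy_cons, chunkBy_nil]
        | c1 :: c2 :: c3 :: c4 :: c5 :: c6 :: c7 :: c8 :: c9 :: r => simp at hs; omega
      rw [chunkBy_short id 3 _ hp (hplen _ h8),
        chunkBy_of_ne_nil (chunkBy f 1) 7 (a :: t) (by simp),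
        List.take_of_length_le h8, List.drop_eq_nil_of_le h8, chunkBy_nil]
      simp
    · push Not at h8
      have htlen : ((a :: t).take 8).length = 8 := by
        simp only [List.length_take, List.length_cons]
        simp only [List.length_cons] at h8
        omega
      conv_lhs => rw [show (a :: t) = (a :: t).take 8 ++ (a :: t).drop 8 from by simp]
      rw [chunkBy_append f 1 _ _ (by rw [htlen]; decide)]
      have hplen : (chunkBy f 1 ((a :: t).take 8)).length = 4 :=
        chunkBy_length_of_eq f 1 4 _ (by rw [htlen])
      rw [chunkBy_append id 3 _ _ (by rw [hplen])]
      rw [chunkBy_short id 3 _ (by intro hc; rw [hc] at hplen; simp at hplen) (by rw [hplen])]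
      rw [IH, chunkBy_cons]
      simp

theorem pvPairsOf_eq (cs : List Char) : pvPairsOf (String.ofList cs) = chunkBy String.ofList 1 cs := by
  unfold pvPairsOf
  simp only [PySem.Str.len_eq, PySem.Str.slice, PySem.Chars.slice, String.toList_ofList]
  have h2 : ((2 : Int)) = ((1 : ℕ) : Int) + 1 := by norm_num
  rw [h2, foldl_pyRange_slice String.ofList 1 cs []]
  simp

-- ===== VERDICT (by name: the statement is the Claim_ definition above) =====
theorem lists_definition_spec : Claim_equal_lists_definition := by
  intro text _
  unfold Spec_lists_definition lists_definition lists_definition_alt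
  simp only [PySem.Str.len_eq, PySem.Str.slice, PySem.Chars.slice]
  have h2 : ((2 : Int)) = ((1 : ℕ) : Int) + 1 := by norm_num
  have h4 : ((4 : Int)) = ((3 : ℕ) : Int) + 1 := by norm_num
  have h8 : ((8 : Int)) = ((7 : ℕ) : Int) + 1 := by norm_num
  rw [h2, foldl_pyRange_slice String.ofList 1 text.toList []]
  simp only [List.nil_append]
  have h3 := foldl_pyRange_slice id 3 (chunkBy String.ofList 1 text.toList) []
  simp only [id, List.nil_append] at h3
  rw [h4, h3, chunk_renest]
  have hB := foldl_pyRange_slice (fun cs => pvPairsOf (String.ofList cs)) 7 text.toList []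
  simp only [List.nil_append] at hB
  rw [h8, hB]
  have hf : (fun cs => pvPairsOf (String.ofList cs)) = chunkBy String.ofList 1 :=
    funext pvPairsOf_eq
  rw [hf]
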